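-- pv_equiv track=rewrite | github.com/MrBrantCode/unitest_baseline | mut_generate/mist_train_taco/taco_16105/solution.py | count_valid_pairs
-- ===== SOURCE A (Python) =====
-- def count_valid_pairs(arr):
--     def patt(n):
--         s = format(n, 'b')[1:]
--         i = len(s) - 1
--         while i >= 0:
--             if s[i] == '1':
--                 if i - 1 < 0:
--                     return False
--                 i -= 2
--             else:
--                 i -= 1
--         return True
--
--     def rev(n):
--         s = format(n, 'b')[1:]
--         ans = ''
--         i = len(s) - 1
--         while i >= 0:
--             if s[i] == '1':
--                 if s[i - 1] == '1':
--                     ans = '01' + ans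
--                 else:
--                     ans = '11' + ans
--                 i -= 2
--             else:
--                 ans = '0' + ans
--                 i -= 1
--         ans = '11' + ans
--         return int(ans, 2)
--
--     arr.sort()
--     mapp = {}
--     ans = 0
--     for i in range(len(arr) - 1, -1, -1):
--         p = patt(arr[i])
--         if p and rev(arr[i]) in mapp:
--             ans += 1
--         mapp[arr[i]] = True
--     return ans
-- ===== SOURCE B (Python) =====
-- def count_valid_pairs(arr):
--     arr.sort()  # kept only to preserve A's in-place sort of the argument
--
--     def toks(n):
--         # Tokenize the binary body of n (format(n, 'b') without its first char),
--         # least-significant bit first: a '0' stands alone, a '1' pairs with the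
--         # bit above it; None when some '1' has no bit above it.
--         r = format(n, 'b')[1:][::-1]
--         out = []
--         while r:
--             if r[0] == '1':
--                 if len(r) == 1:
--                     return None
--                 out.append('01' if r[1] == '1' else '11')
--                 r = r[2:]
--             else:
--                 out.append('0')
--                 r = r[1:]
--         return out
--
--     cnt = {}
--     for x in arr:
--         cnt[x] = cnt.get(x, 0) + 1
--     total = 0
--     for v, m in cnt.items():
--         t = toks(v)
--         if t is not None:
--             r = int('11' + ''.join(reversed(t)), 2)
--             if r == v:
--                 total += m - 1
--             elif r > v and r in cnt:
--                 total += m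
--     return total
-- ===== Notes on version B (the rewrite author's own statement) =====
-- stated objective: alternative
-- what changed: Replaces A's two index-loop bit scans (patt and rev) with one structural tokenizer of the reversed binary body that returns None where patt fails, and replaces A's descending seen-dict scan with count arithmetic over the distinct values of a Counter.
import Mathlib
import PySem

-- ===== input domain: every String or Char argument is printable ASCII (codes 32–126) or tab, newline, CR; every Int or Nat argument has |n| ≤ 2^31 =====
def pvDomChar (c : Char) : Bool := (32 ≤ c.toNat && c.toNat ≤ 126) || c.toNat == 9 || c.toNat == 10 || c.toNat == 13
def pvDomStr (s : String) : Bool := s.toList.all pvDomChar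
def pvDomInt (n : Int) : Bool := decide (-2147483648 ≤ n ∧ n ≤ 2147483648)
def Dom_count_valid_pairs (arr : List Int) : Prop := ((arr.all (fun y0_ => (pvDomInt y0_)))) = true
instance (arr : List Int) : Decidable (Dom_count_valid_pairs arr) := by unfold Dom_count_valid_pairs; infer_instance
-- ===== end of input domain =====

-- B replaces A's two index-loop bit scans with one structural tokenizer of the reversed binary body
-- and A's descending seen-dict scan with count arithmetic over a Counter; equivalence is about the
-- RETURN value only (both Pythons sort the argument in place, an identical side effect).

-- ===== PORT A =====

-- format(n, 'b')[1:]  (the slice [1:] of a nonempty string is drop 1)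
def sBitsA (n : Int) : List Char := (PySem.Int.toBinChars n).drop 1

-- the while-loop of A's patt; s[i] via pyGet? (none = IndexError, unreachable for A's calls)
def pattLoopA (s : List Char) (i : Int) : Bool :=
  if _h : 0 ≤ i then
    match PySem.List.pyGet? s i with
    | some c =>
      if c = '1' then
        if i - 1 < 0 then false
        else pattLoopA s (i - 2)
      else pattLoopA s (i - 1)
    | none => false
  else true
termination_by (i + 1).toNat
decreasing_by all_goals omega

def pattA (n : Int) : Bool :=
  pattLoopA (sBitsA n) (((sBitsA n).length : Int) - 1)

-- the while-loop of A's rev; s[i-1] via pyGet? (Python negative-index rule; the none default is unreachable)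
def revLoopA (s : List Char) (i : Int) (ans : List Char) : List Char :=
  if _h : 0 ≤ i then
    match PySem.List.pyGet? s i with
    | some c =>
      if c = '1' then
        revLoopA s (i - 2)
          ((if (PySem.List.pyGet? s (i - 1)).getD ' ' = '1' then ['0', '1'] else ['1', '1']) ++ ans)
      else revLoopA s (i - 1) ('0' :: ans)
    | none => ans
  else ans
termination_by (i + 1).toNat
decreasing_by all_goals omega

-- int('11' + ans, 2); the getD 0 covers the ValueError branch, unreachable (the string is nonempty 0/1)
def revA (n : Int) : Int :=
  (PySem.Int.ofCharsBase?
    (['1', '1'] ++ revLoopA (sBitsA n) (((sBitsA n).length : Int) - 1) []) 2).getD 0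

def count_valid_pairs (arr : List Int) : Int :=
  let sa := PySem.List.sorted arr (fun x => x) false
  let res := (PySem.List.pyRange (PySem.List.len sa - 1) (-1) (-1)).foldl
    (fun (st : PySem.Dict Int Bool × Int) i =>
      let x := PySem.List.pyGetD sa i 0
      let p := pattA x
      let st2 := if p && st.1.contains (revA x) then (st.1, st.2 + 1) else st
      (st2.1.insert x true, st2.2))
    (PySem.Dict.empty, 0)
  res.2

-- ===== PORT B =====

-- B's tokenizer loop: consumes the reversed binary body from the front ('0' alone, a '1' with the
-- bit above it), appending chunks; none where a '1' has no bit above it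
def toksLoopB : List Char → Option (List (List Char))
  | [] => some []
  | c :: rest =>
    if c = '1' then
      match rest with
      | [] => none
      | d :: rest' =>
        match toksLoopB rest' with
        | none => none
        | some out => some ((if d = '1' then ['0', '1'] else ['1', '1']) :: out)
    else
      match toksLoopB rest with
      | none => none
      | some out => some (['0'] :: out)

-- format(n, 'b')[1:][::-1]  ([1:] of a nonempty string is drop 1; [::-1] is reverse)
def toksB (n : Int) : Option (List (List Char)) :=
  toksLoopB ((PySem.Int.toBinChars n).drop 1).reverse

def count_valid_pairs_alt (arr : List Int) : Int :=
  let sa := PySem.List.sorted arr (fun x => x) false  -- arr.sort(): kept for the in-place side effect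
  let cnt := sa.foldl (fun (d : PySem.Dict Int Int) x => d.insert x (d.getD x 0 + 1)) PySem.Dict.empty
  cnt.items.foldl (fun total vm =>
    match toksB vm.1 with
    | none => total
    | some t =>
      -- int('11' + ''.join(reversed(t)), 2); the getD 0 covers the unreachable ValueError branch
      let r := (PySem.Int.ofCharsBase? (['1', '1'] ++ t.reverse.flatten) 2).getD 0
      if r = vm.1 then total + (vm.2 - 1)
      else if r > vm.1 && cnt.contains r then total + vm.2
      else total) 0

-- ===== PRECONDITION & SPEC =====
def Spec_count_valid_pairs (arr : List Int) (out : Int) : Prop := out = count_valid_pairs_alt arr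
instance (arr : List Int) (out : Int) : Decidable (Spec_count_valid_pairs arr out) := by unfold Spec_count_valid_pairs; infer_instance

-- ===== CLAIM (what is proved, stated in full; the proofs are below) =====
def Claim_equal_count_valid_pairs : Prop := ∀ (arr : List Int), Dom_count_valid_pairs arr → Spec_count_valid_pairs arr (count_valid_pairs arr)

-- ===== LEMMAS AND PROOFS =====

-- The tokenizer applied to the reversed k-prefix of s mirrors A's two scans at index k-1:
-- it is some exactly where pattLoopA is true, and its joined reversal is what revLoopA prepends.
theorem toksLoopB_cons (c : Char) (rest : List Char) :
    toksLoopB (c :: rest) =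
      if c = '1' then
        match rest with
        | [] => none
        | d :: rest' =>
          match toksLoopB rest' with
          | none => none
          | some out => some ((if d = '1' then ['0', '1'] else ['1', '1']) :: out)
      else
        match toksLoopB rest with
        | none => none
        | some out => some (['0'] :: out) := by
  rw [toksLoopB.eq_def]

theorem toks_patt_rev (s : List Char) : ∀ k : Nat, k ≤ s.length →
    pattLoopA s ((k : Int) - 1) = (toksLoopB ((s.take k).reverse)).isSome ∧
    (∀ T ans, toksLoopB ((s.take k).reverse) = some T →
      revLoopA s ((k : Int) - 1) ans = T.reverse.flatten ++ ans) := by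
  intro k
  induction k using Nat.strong_induction_on with
  | _ k ih =>
    intro hk
    match k with
    | 0 =>
      refine ⟨by rw [pattLoopA]; simp [toksLoopB], ?_⟩
      intro T ans hT
      rw [revLoopA]
      simp only [toksLoopB, List.take_zero, List.reverse_nil, Option.some.injEq] at hT
      simp [← hT]
    | (k + 1) =>
      have hklt : k < s.length := by omega
      have htake : (s.take (k + 1)).reverse = s[k] :: (s.take k).reverse := by
        rw [List.take_add_one]
        simp [List.getElem?_eq_getElem hklt]
      have hidxp : pattLoopA s (((k + 1 : Nat) : Int) - 1) = pattLoopA s ((k : Nat) : Int) := by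
        norm_num
      have hidxr : ∀ ans, revLoopA s (((k + 1 : Nat) : Int) - 1) ans = revLoopA s ((k : Nat) : Int) ans := by
        intro ans; norm_num
      have hget : PySem.List.pyGet? s ((k : Nat) : Int) = some s[k] := by
        simp [List.getElem?_eq_getElem hklt]
      by_cases hc : s[k] = '1'
      · -- a '1' at the top of the prefix: it needs the bit below it
        match k, hklt, htake, hget with
        | 0, hklt, htake, hget =>
          refine ⟨?_, ?_⟩
          · rw [hidxp, pattLoopA]
            simp only [Nat.cast_zero] at hget ⊢
            rw [htake, List.take_zero, List.reverse_nil, toksLoopB_cons, if_pos hc]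
            simp [hget, hc]
          · intro T ans hT
            rw [htake, List.take_zero, List.reverse_nil, toksLoopB_cons, if_pos hc] at hT
            simp at hT
        | (m + 1), hklt, htake, hget =>
          have hmlt : m < s.length := by omega
          have htake2 : (s.take (m + 1)).reverse = s[m] :: (s.take m).reverse := by
            rw [List.take_add_one]
            simp [List.getElem?_eq_getElem hmlt]
          have hget2 : PySem.List.pyGet? s ((m : Nat) : Int) = some s[m] := by
            simp [List.getElem?_eq_getElem hmlt]
          obtain ⟨ihp, ihr⟩ := ih m (by omega) (by omega)
          have harith1 : ¬ (((m + 1 : Nat) : Int) - 1 < 0) := by push_cast; omega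
          have harith2 : ((m + 1 : Nat) : Int) - 2 = ((m : Nat) : Int) - 1 := by push_cast; ring
          have harith3 : ((m + 1 : Nat) : Int) - 1 = ((m : Nat) : Int) := by push_cast; ring
          refine ⟨?_, ?_⟩
          · rw [hidxp, pattLoopA]
            rw [dif_pos (by positivity), hget, htake, htake2, toksLoopB_cons, if_pos hc]
            simp only [hc, if_true, harith1, if_false, harith2, ihp]
            cases htoks : toksLoopB ((s.take m).reverse) <;> simp
          · intro T ans hT
            rw [htake, htake2, toksLoopB_cons, if_pos hc] at hT
            cases htoks : toksLoopB ((s.take m).reverse) with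
            | none => simp [htoks] at hT
            | some out =>
              simp only [htoks, Option.some.injEq] at hT
              rw [hidxr, revLoopA]
              rw [dif_pos (by positivity), hget]
              simp only [hc, if_true, harith2, harith3, hget2]
              rw [ihr out _ htoks, ← hT]
              simp [Option.getD]
      · -- a non-'1' char stands alone
        obtain ⟨ihp, ihr⟩ := ih k (by omega) (by omega)
        refine ⟨?_, ?_⟩
        · rw [hidxp, pattLoopA]
          rw [dif_pos (by positivity), hget, htake, toksLoopB_cons, if_neg hc]
          simp only [hc, if_false, ihp]
          cases htoks : toksLoopB ((s.take k).reverse) <;> simp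
        · intro T ans hT
          rw [htake, toksLoopB_cons, if_neg hc] at hT
          cases htoks : toksLoopB ((s.take k).reverse) with
          | none => simp [htoks] at hT
          | some out =>
            simp only [htoks, Option.some.injEq] at hT
            rw [hidxr, revLoopA]
            rw [dif_pos (by positivity), hget]
            simp only [hc, if_false]
            rw [ihr out _ htoks, ← hT]
            simp
theorem pattA_eq_toks (n : Int) : pattA n = (toksB n).isSome := by
  have h := (toks_patt_rev (sBitsA n) (sBitsA n).length le_rfl).1
  rw [List.take_length] at h
  exact h
theorem revA_eq_toks (n : Int) (T : List (List Char)) (h : toksB n = some T) :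
    revA n = (PySem.Int.ofCharsBase? (['1', '1'] ++ T.reverse.flatten) 2).getD 0 := by
  have hr := (toks_patt_rev (sBitsA n) (sBitsA n).length le_rfl).2 T []
  rw [List.take_length] at hr
  rw [revA, hr h, List.append_nil]
-- abstract form of A's scan: seen values as a PySem.Set (the keys of mapp)
def scanA : List Int → List Int → Int
  | [], _ => 0
  | x :: xs, seen =>
      (if pattA x && decide (revA x ∈ seen) then (1 : Int) else 0) + scanA xs (PySem.Set.add seen x)

-- per-value contribution of B's loop, with membership tested in an explicit value list V
def contribV (v : Int) (m : Int) (V : List Int) : Int :=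
  if pattA v then
    if revA v = v then m - 1
    else if revA v > v ∧ revA v ∈ V then m
    else 0
  else 0

theorem keys_insert_eq_add (d : PySem.Dict Int Bool) (x : Int) (v : Bool) :
    (d.insert x v).keys = PySem.Set.add d.keys x := by
  by_cases hc : d.contains x = true
  · rw [PySem.Dict.keys_insert_of_contains d v hc,
      PySem.Set.add_of_mem ((PySem.Dict.contains_iff_mem_keys _ _).mp hc)]
  · rw [PySem.Dict.keys_insert_of_not_contains d v (by simpa using hc),
      PySem.Set.add_of_not_mem (fun h => hc ((PySem.Dict.contains_iff_mem_keys _ _).mpr h))]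

theorem foldA_eq_scanA (l : List Int) (d : PySem.Dict Int Bool) (a : Int) (hnd : d.keys.Nodup) :
    (l.foldl (fun (st : PySem.Dict Int Bool × Int) x =>
      let st2 := if pattA x && st.1.contains (revA x) then (st.1, st.2 + 1) else st
      (st2.1.insert x true, st2.2)) (d, a)).2 = a + scanA l d.keys := by
  induction l generalizing d a with
  | nil => simp [scanA]
  | cons x xs ih =>
    have hc : d.contains (revA x) = decide (revA x ∈ d.keys) :=
      PySem.Dict.contains_eq_decide_mem_keys d (revA x)
    simp only [List.foldl_cons, scanA]
    by_cases h : (pattA x && d.contains (revA x)) = true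
    · rw [if_pos h]
      rw [ih _ _ (PySem.Dict.nodup_keys_insert d x true hnd), keys_insert_eq_add]
      rw [hc] at h
      rw [if_pos h]
      ring
    · rw [if_neg h]
      rw [ih _ _ (PySem.Dict.nodup_keys_insert d x true hnd), keys_insert_eq_add]
      rw [hc] at h
      rw [if_neg h]
      ring

theorem scanA_append (l₁ l₂ seen : List Int) :
    scanA (l₁ ++ l₂) seen = scanA l₁ seen + scanA l₂ (PySem.Set.update seen l₁) := by
  induction l₁ generalizing seen with
  | nil => simp [scanA, PySem.Set.update_nil]
  | cons x xs ih => simp [scanA, ih, PySem.Set.update_cons]; ring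

theorem scanA_replicate (k : Nat) (v : Int) (seen : List Int) :
    scanA (List.replicate (k + 1) v) seen =
      if pattA v then
        if revA v ∈ seen then (k : Int) + 1
        else if revA v = v then (k : Int)
        else 0
      else 0 := by
  induction k generalizing seen with
  | zero =>
    by_cases hp : pattA v
    · by_cases hs : revA v ∈ seen
      · simp [List.replicate_succ, scanA, hp, hs]
      · by_cases he : revA v = v <;> simp [List.replicate_succ, scanA, hp, hs, he]
    · simp [List.replicate_succ, scanA, hp]
  | succ k ih =>
    rw [List.replicate_succ, scanA, ih]
    by_cases hp : pattA v
    · by_cases hs : revA v ∈ seen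
      · have : revA v ∈ PySem.Set.add seen v := by
          rw [PySem.Set.mem_add]; exact Or.inl hs
        simp [hp, hs, this]
        omega
      · by_cases he : revA v = v
        · have hm : revA v ∈ PySem.Set.add seen v := by
            rw [PySem.Set.mem_add]; exact Or.inr he
          rw [he] at hs hm
          simp [hp, hs, he]
        · have : revA v ∉ PySem.Set.add seen v := by
            rw [PySem.Set.mem_add]; rintro (h | h) <;> [exact hs h; exact he h]
          simp [hp, hs, he, this]
    · simp [hp]

-- a descending list starts with all copies of its head
theorem desc_decomp : ∀ (D : List Int) (v : Int) (rest : List Int), D = v :: rest →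
    D.Pairwise (fun a b => b ≤ a) →
    ∃ (k : Nat) (d : List Int), D = List.replicate (k + 1) v ++ d ∧ (∀ x ∈ d, x < v) ∧
      d.Pairwise (fun a b => b ≤ a) := by
  intro D
  induction D with
  | nil => intro v rest h; cases h
  | cons w ws ih =>
    intro v rest h hP
    obtain ⟨hw, hrest⟩ : w = v ∧ ws = rest := by
      injection h with h1 h2; exact ⟨h1, h2⟩
    subst hw hrest
    cases hws : ws with
    | nil => exact ⟨0, [], by simp, by simp, List.Pairwise.nil⟩
    | cons u us =>
      have hP' : ws.Pairwise (fun a b => b ≤ a) := (List.pairwise_cons.mp hP).2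
      have hle : u ≤ w := (List.pairwise_cons.mp hP).1 u (by simp [hws])
      by_cases huv : u = w
      · obtain ⟨k, d, h1, h2, h3⟩ := ih w us (by rw [hws, huv]) hP'
        refine ⟨k + 1, d, ?_, h2, h3⟩
        rw [← hws, h1]
        simp [List.replicate_succ]
      · rw [hws] at hP'
        have hu : u < w := lt_of_le_of_ne hle huv
        refine ⟨0, u :: us, by simp, ?_, hP'⟩
        intro x hx
        rcases List.mem_cons.mp hx with h | h
        · exact h ▸ hu
        · exact lt_of_le_of_lt ((List.pairwise_cons.mp hP').1 x h) hu

theorem ofList_replicate_append (k : Nat) (v : Int) (d : List Int) (hd : v ∉ d) :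
    PySem.Set.ofList (List.replicate (k + 1) v ++ d) = v :: PySem.Set.ofList d := by
  have hnilv : ∀ (w : Int) (s : List Int), (∀ y ∈ s, y = w) → PySem.Set.discard s w = [] := by
    intro w s hs
    apply List.eq_nil_iff_forall_not_mem.mpr
    intro y hy
    rw [PySem.Set.mem_discard] at hy
    exact hy.2 (hs y hy.1)
  have h1 : PySem.Set.ofList (List.replicate (k + 1) v) = [v] := by
    induction k with
    | zero =>
      rw [List.replicate_one, PySem.Set.ofList_cons, PySem.Set.ofList_nil]
      rw [hnilv v [] (by simp)]
    | succ k ih =>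
      rw [List.replicate_succ, PySem.Set.ofList_cons, ih]
      rw [hnilv v [v] (by simp)]
  rw [PySem.Set.ofList_append, h1, PySem.Set.update_eq_append_filter]
  have : (PySem.Set.ofList d).filter (fun y => !(PySem.Set.contains [v] y)) = PySem.Set.ofList d := by
    apply List.filter_eq_self.mpr
    intro y hy
    have hyd : y ∈ d := (PySem.Set.mem_ofList _ _).mp hy
    have : y ≠ v := fun h => hd (h ▸ hyd)
    simp [PySem.Set.contains, this]
  rw [this]
  rfl

theorem scanA_main : ∀ (n : Nat) (D seen V : List Int), D.length ≤ n →
    D.Pairwise (fun a b => b ≤ a) →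
    (∀ y, y ∈ seen ↔ (y ∈ V ∧ ∀ x ∈ D, x < y)) →
    (∀ y, y ∈ V ↔ (y ∈ seen ∨ y ∈ D)) →
    scanA D seen = ((PySem.Set.ofList D).map (fun v => contribV v (D.count v) V)).sum := by
  intro n
  induction n with
  | zero =>
    intro D seen V hlen _ _ _
    have : D = [] := List.eq_nil_of_length_eq_zero (Nat.le_zero.mp hlen)
    subst this
    simp [scanA, PySem.Set.ofList_nil]
  | succ n ih =>
    intro D seen V hlen hP H H2
    cases D with
    | nil => simp [scanA, PySem.Set.ofList_nil]
    | cons v rest =>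
      obtain ⟨k, d, h1, h2, h3⟩ := desc_decomp (v :: rest) v rest rfl hP
      have hvd : v ∉ d := fun h => lt_irrefl v (h2 v h)
      have hlen' : d.length ≤ n := by
        have := congrArg List.length h1
        simp [List.length_replicate] at this
        simp at hlen
        omega
      have hDle : ∀ x ∈ v :: rest, x ≤ v := by
        intro x hx
        rcases List.mem_cons.mp hx with h | h
        · exact le_of_eq h
        · exact (List.pairwise_cons.mp hP).1 x h
      have hmemD : ∀ y, y ∈ v :: rest ↔ (y = v ∨ y ∈ d) := by
        intro y
        rw [h1]
        simp [List.mem_append, List.mem_replicate]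
      have hmem' : ∀ y, y ∈ PySem.Set.update seen (List.replicate (k + 1) v) ↔ (y ∈ seen ∨ y = v) := by
        intro y
        rw [PySem.Set.mem_update]
        simp [List.mem_replicate]
      have H' : ∀ y, y ∈ PySem.Set.update seen (List.replicate (k + 1) v) ↔
          (y ∈ V ∧ ∀ x ∈ d, x < y) := by
        intro y
        rw [hmem']
        constructor
        · rintro (hy | hy)
          · obtain ⟨hyV, hlt⟩ := (H y).mp hy
            exact ⟨hyV, fun x hx => hlt x ((hmemD x).mpr (Or.inr hx))⟩
          · subst hy
            exact ⟨(H2 y).mpr (Or.inr (by simp)), h2⟩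
        · rintro ⟨hyV, hlt⟩
          rcases (H2 y).mp hyV with hy | hy
          · exact Or.inl hy
          · rcases (hmemD y).mp hy with hy' | hy'
            · exact Or.inr hy'
            · exact absurd (hlt y hy') (lt_irrefl y)
      have H2' : ∀ y, y ∈ V ↔ (y ∈ PySem.Set.update seen (List.replicate (k + 1) v) ∨ y ∈ d) := by
        intro y
        rw [hmem', H2 y, hmemD y]
        tauto
      have hrec := ih d (PySem.Set.update seen (List.replicate (k + 1) v)) V hlen' h3 H' H2'
      have hcv : (v :: rest).count v = k + 1 := by
        rw [h1, List.count_append, List.count_replicate_self, List.count_eq_zero.mpr hvd]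
      have hcu : ∀ u ∈ d, (v :: rest).count u = d.count u := by
        intro u hu
        have hne : u ≠ v := fun h => lt_irrefl v (h ▸ h2 u hu)
        have hne' : ¬ v = u := fun h => hne h.symm
        rw [h1, List.count_append, List.count_replicate]
        simp [hne']
      have hhead : scanA (List.replicate (k + 1) v) seen = contribV v ((k : Int) + 1) V := by
        rw [scanA_replicate, contribV]
        by_cases hp : pattA v
        · by_cases he : revA v = v
          · have hns : v ∉ seen := fun hvs =>
              absurd (((H v).mp hvs).2 v (by simp)) (lt_irrefl v)
            simp [hp, he, hns]
          · have hiff : revA v ∈ seen ↔ (revA v > v ∧ revA v ∈ V) := by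
              rw [H (revA v)]
              constructor
              · rintro ⟨hV, hlt⟩
                exact ⟨hlt v (by simp), hV⟩
              · rintro ⟨hgt, hV⟩
                exact ⟨hV, fun x hx => lt_of_le_of_lt (hDle x hx) hgt⟩
            by_cases hs : revA v ∈ seen
            · simp [hp, he, hs, hiff.mp hs]
            · have : ¬(revA v > v ∧ revA v ∈ V) := fun h => hs (hiff.mpr h)
              simp [hp, he, hs, this]
        · simp [hp]
      have hof : PySem.Set.ofList (v :: rest) = v :: PySem.Set.ofList d := by
        rw [h1]; exact ofList_replicate_append k v d hvd
      rw [h1, scanA_append, hhead, hrec]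
      rw [← h1, hof]
      rw [List.map_cons, List.sum_cons, hcv]
      have : ((PySem.Set.ofList d).map (fun u => contribV u ((v :: rest).count u) V)) =
          ((PySem.Set.ofList d).map (fun u => contribV u (d.count u) V)) := by
        apply List.map_congr_left
        intro u hu
        rw [hcu u ((PySem.Set.mem_ofList _ _).mp hu)]
      rw [this]
      push_cast
      ring

theorem foldl_contrib (cnt : PySem.Dict Int Int) :
    ∀ (l : List (Int × Int)) (init : Int),
    l.foldl (fun total vm =>
      match toksB vm.1 with
      | none => total
      | some t =>
        let r := (PySem.Int.ofCharsBase? (['1', '1'] ++ t.reverse.flatten) 2).getD 0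
        if r = vm.1 then total + (vm.2 - 1)
        else if r > vm.1 && cnt.contains r then total + vm.2
        else total) init
      = init + (l.map (fun vm =>
          match toksB vm.1 with
          | none => 0
          | some t =>
            let r := (PySem.Int.ofCharsBase? (['1', '1'] ++ t.reverse.flatten) 2).getD 0
            if r = vm.1 then vm.2 - 1
            else if r > vm.1 && cnt.contains r then vm.2
            else 0)).sum := by
  intro l
  induction l with
  | nil => intro init; simp
  | cons vm tl ih =>
    intro init
    simp only [List.foldl_cons, List.map_cons, List.sum_cons]
    cases h : toksB vm.1 with
    | none => rw [ih]; ring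
    | some t =>
      simp only []
      rw [ih]
      split_ifs <;> ring
theorem alt_eq_sum (arr : List Int) :
    count_valid_pairs_alt arr =
      ((PySem.Set.ofList (PySem.List.sorted arr (fun x => x) false)).map
        (fun v => contribV v ((PySem.List.sorted arr (fun x => x) false).count v)
          (PySem.List.sorted arr (fun x => x) false))).sum := by
  rw [count_valid_pairs_alt]
  rw [PySem.Dict.foldl_insert_getD_add_one_eq_counter]
  rw [foldl_contrib]
  rw [PySem.Dict.items_counter, List.map_map]
  rw [zero_add]
  apply congrArg
  apply List.map_congr_left
  intro u _
  simp only [Function.comp_apply, contribV]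
  cases h : toksB u with
  | none =>
    have hp : pattA u = false := by rw [pattA_eq_toks, h, Option.isSome_none]
    simp [hp]
  | some T =>
    have hp : pattA u = true := by rw [pattA_eq_toks, h, Option.isSome_some]
    have hr : (PySem.Int.ofCharsBase? (['1', '1'] ++ T.reverse.flatten) 2).getD 0 = revA u :=
      (revA_eq_toks u T h).symm
    simp only [hp, if_true, hr]
    by_cases he : revA u = u
    · simp [he]
    · have hcc : ((PySem.Dict.counter (PySem.List.sorted arr (fun x => x) false)).contains (revA u)) =
          decide (revA u ∈ PySem.List.sorted arr (fun x => x) false) := by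
        rw [PySem.Dict.contains_counter]
        simp
      simp only [he, if_false, hcc]
      by_cases hgt : revA u > u
      · by_cases hm : revA u ∈ PySem.List.sorted arr (fun x => x) false
        · simp [hgt, hm]
        · simp [hgt, hm]
      · simp [hgt]
theorem foldl_getD_general (sa : List Int) (G : (PySem.Dict Int Bool × Int) → Int → (PySem.Dict Int Bool × Int))
    (init : PySem.Dict Int Bool × Int) :
    ((PySem.List.pyRange 0 (sa.length : Int) 1).reverse.foldl
      (fun st i => G st (PySem.List.pyGetD sa i 0)) init) = sa.reverse.foldl G init := by
  rw [← List.foldl_map, List.map_reverse, PySem.List.map_pyGetD_pyRange_zero']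

theorem a_eq_scan (arr : List Int) :
    count_valid_pairs arr = scanA (PySem.List.sorted arr (fun x => x) false).reverse [] := by
  rw [count_valid_pairs]
  have h0 : PySem.List.pyRange (PySem.List.len (PySem.List.sorted arr (fun x => x) false) - 1) (-1) (-1)
      = (PySem.List.pyRange 0 ((PySem.List.sorted arr (fun x => x) false).length : Int) 1).reverse := by
    rw [PySem.List.pyRange_neg_one_eq_reverse]
    norm_num [PySem.List.len_eq]
  rw [h0]
  rw [foldl_getD_general (PySem.List.sorted arr (fun x => x) false)
    (fun st x =>
      let st2 := if pattA x && st.1.contains (revA x) then (st.1, st.2 + 1) else st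
      (st2.1.insert x true, st2.2)) (PySem.Dict.empty, 0)]
  rw [foldA_eq_scanA _ _ _ (by simp [PySem.Dict.keys_empty])]
  rw [PySem.Dict.keys_empty, zero_add]

-- ===== VERDICT (by name: the statement is the Claim_ definition above) =====
theorem count_valid_pairs_spec : Claim_equal_count_valid_pairs := by
  intro arr _
  unfold Spec_count_valid_pairs
  rw [a_eq_scan, alt_eq_sum]
  have hpair : (PySem.List.sorted arr (fun x => x) false).reverse.Pairwise (fun a b => b ≤ a) := by
    rw [List.pairwise_reverse]
    exact PySem.List.sorted_pairwise arr (fun x => x)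
  have H : ∀ y : Int, y ∈ ([] : List Int) ↔
      (y ∈ PySem.List.sorted arr (fun x => x) false ∧
        ∀ x ∈ (PySem.List.sorted arr (fun x => x) false).reverse, x < y) := by
    intro y
    constructor
    · intro h; cases h
    · rintro ⟨hy, h⟩
      exact absurd (h y (List.mem_reverse.mpr hy)) (lt_irrefl y)
  have H2 : ∀ y : Int, y ∈ PySem.List.sorted arr (fun x => x) false ↔
      (y ∈ ([] : List Int) ∨ y ∈ (PySem.List.sorted arr (fun x => x) false).reverse) := by
    intro y
    simp
  rw [scanA_main (PySem.List.sorted arr (fun x => x) false).reverse.length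
    (PySem.List.sorted arr (fun x => x) false).reverse [] (PySem.List.sorted arr (fun x => x) false)
    le_rfl hpair H H2]
  have hperm : (PySem.Set.ofList (PySem.List.sorted arr (fun x => x) false).reverse).Perm
      (PySem.Set.ofList (PySem.List.sorted arr (fun x => x) false)) := by
    rw [List.perm_ext_iff_of_nodup (PySem.Set.nodup_ofList _) (PySem.Set.nodup_ofList _)]
    intro y
    simp [PySem.Set.mem_ofList]
  have hcnt : ∀ v : Int, (PySem.List.sorted arr (fun x => x) false).reverse.count v =
      (PySem.List.sorted arr (fun x => x) false).count v := by
    intro v; exact List.count_reverse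
  calc ((PySem.Set.ofList (PySem.List.sorted arr (fun x => x) false).reverse).map
        (fun v => contribV v ((PySem.List.sorted arr (fun x => x) false).reverse.count v)
          (PySem.List.sorted arr (fun x => x) false))).sum
      = ((PySem.Set.ofList (PySem.List.sorted arr (fun x => x) false).reverse).map
        (fun v => contribV v ((PySem.List.sorted arr (fun x => x) false).count v)
          (PySem.List.sorted arr (fun x => x) false))).sum := by
        apply congrArg
        apply List.map_congr_left
        intro u _
        rw [hcnt u]
    _ = ((PySem.Set.ofList (PySem.List.sorted arr (fun x => x) false)).map
        (fun v => contribV v ((PySem.List.sorted arr (fun x => x) false).count v)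
          (PySem.List.sorted arr (fun x => x) false))).sum := by
        exact (hperm.map _).sum_eq
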